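-- pv_equiv track=rewrite | github.com/ssolllll/Coding_test_practice | Programmers_Lv.3/최고의 집합.py | solution
-- ===== SOURCE A (Python) =====
-- def solution(n, s):
--     if n > s:
--         return [-1]
--     elif n == 1:
--         return [s]
--     answer = [s//n for i in range(n)]
--     ind = len(answer) - 1
--     for i in range(s - sum(answer)):
--         answer[ind] += 1
--         ind -= 1
--     return answer
-- ===== SOURCE B (Python) =====
-- def solution(n, s):
--     if n > s:
--         return [-1]
--     q, r = divmod(s, n)
--     return [q] * (n - r) + [q + 1] * r
-- ===== Notes on version B (the rewrite author's own statement) =====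
-- stated objective: simpler
-- what changed: B replaces A's build-then-distribute loop (fill [s//n]*n, then a loop incrementing the last s-sum(answer) entries) with the closed form divmod: [q]*(n-r) + [q+1]*r, which also subsumes A's special n==1 branch.
-- outside the precondition, e.g. on solution(0, 0): A returns [], B raises ZeroDivisionError
import Mathlib
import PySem

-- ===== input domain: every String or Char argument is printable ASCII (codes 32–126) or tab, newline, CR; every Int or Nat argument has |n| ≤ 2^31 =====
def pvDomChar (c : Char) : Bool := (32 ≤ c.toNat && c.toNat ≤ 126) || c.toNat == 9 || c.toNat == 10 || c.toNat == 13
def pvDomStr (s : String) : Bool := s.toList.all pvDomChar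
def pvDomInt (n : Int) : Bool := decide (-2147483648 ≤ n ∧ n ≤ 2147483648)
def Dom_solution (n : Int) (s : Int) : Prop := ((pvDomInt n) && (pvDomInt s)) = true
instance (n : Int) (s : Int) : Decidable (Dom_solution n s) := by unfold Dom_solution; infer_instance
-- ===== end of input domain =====

-- B replaces A's remainder-distribution loop with the divmod closed form [q]*(n-r) ++ [q+1]*r (simpler; subsumes A's n==1 branch).


-- ===== PORT A =====
-- loop body of 'for i in range(s - sum(answer)): answer[ind] += 1; ind -= 1'
def stepA (p : List Int × Int) (_ : Int) : List Int × Int :=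
  (PySem.List.pySetD p.1 p.2 (PySem.List.pyGetD p.1 p.2 0 + 1), p.2 - 1)

def solution (n : Int) (s : Int) : List Int :=
  if n > s then [-1]
  else if n = 1 then [s]
  else
    let answer := (PySem.List.pyRange 0 n 1).map (fun _ => PySem.Int.floordiv s n)
    let ind : Int := (answer.length : Int) - 1
    ((PySem.List.pyRange 0 (s - answer.sum) 1).foldl stepA (answer, ind)).1

-- ===== PORT B =====
def solution_alt (n : Int) (s : Int) : List Int :=
  if n > s then [-1]
  else
    let q := PySem.Int.floordiv s n
    let r := PySem.Int.mod s n
    List.replicate (n - r).toNat q ++ List.replicate r.toNat (q + 1)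

-- ===== PRECONDITION & SPEC =====
-- Pre_ excludes n ≤ 0 ∧ s > 0, where A raises IndexError (answer[-1] on the empty list),
-- and the single point n = 0 ∧ s = 0, where A's [] is an accident of range(0) and B raises ZeroDivisionError.
def Pre_solution (n : Int) (s : Int) : Prop := ¬(n ≤ 0 ∧ 0 < s) ∧ ¬(n = 0 ∧ s = 0)
instance (n : Int) (s : Int) : Decidable (Pre_solution n s) := by unfold Pre_solution; infer_instance
def pvWitness_solution : Int × Int := (3, 11)

def Spec_solution (n : Int) (s : Int) (out : List Int) : Prop := out = solution_alt n s
instance (n : Int) (s : Int) (out : List Int) : Decidable (Spec_solution n s out) := by unfold Spec_solution; infer_instance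

-- ===== CLAIM (what is proved, stated in full; the proofs are below) =====
def Claim_equal_solution : Prop := ∀ (n : Int) (s : Int), Dom_solution n s → Pre_solution n s → Spec_solution n s (solution n s)

-- ===== LEMMAS AND PROOFS =====

-- A's distribution loop: starting from m copies of q with index m-1, k iterations turn the last k entries into q+1.
lemma loopA (q : Int) (m k : Nat) (h : k ≤ m) :
    (PySem.List.pyRange 0 (k : Int) 1).foldl stepA (List.replicate m q, (m : Int) - 1)
      = (List.replicate (m - k) q ++ List.replicate k (q + 1), (m : Int) - 1 - k) := by
  induction k with
  | zero => simp
  | succ k ih =>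
    have hk : k ≤ m := Nat.le_of_succ_le h
    have hrange : PySem.List.pyRange 0 ((k : Int) + 1) 1
        = PySem.List.pyRange 0 (k : Int) 1 ++ [(k : Int)] :=
      PySem.List.pyRange_one_succ_right (by exact_mod_cast Nat.zero_le k)
    rw [show ((k + 1 : Nat) : Int) = (k : Int) + 1 by push_cast; ring, hrange,
       List.foldl_append, ih hk]
    have hidx : (m : Int) - 1 - k = ((m - k - 1 : Nat) : Int) := by
      omega
    simp only [List.foldl_cons, List.foldl_nil, stepA, hidx]
    have hlen : m - k - 1 < (List.replicate (m - k) q ++ List.replicate k (q + 1)).length := by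
      simp [List.length_append, List.length_replicate]; omega
    have hget : PySem.List.pyGetD
        (List.replicate (m - k) q ++ List.replicate k (q + 1)) ((m - k - 1 : Nat) : Int) 0 = q := by
      rw [PySem.List.pyGetD_natCast]
      rw [List.getD_eq_getElem _ _ hlen]
      rw [List.getElem_append_left (by simp [List.length_replicate]; omega)]
      simp
    rw [hget, PySem.List.pySetD_natCast]
    have hrep : List.replicate (m - k) q
        = List.replicate (m - k - 1) q ++ [q] := by
      rw [← List.replicate_succ', show m - k - 1 + 1 = m - k by omega]
    have hfst : (List.replicate (m - k) q ++ List.replicate k (q + 1)).set (m - k - 1) (q + 1)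
        = List.replicate (m - (k + 1)) q ++ List.replicate (k + 1) (q + 1) := by
      rw [hrep, List.append_assoc, List.set_append_right _ _ (by simp),
          show m - (k + 1) = m - k - 1 by omega]
      simp [List.replicate_succ]
    have hsnd : ((m - k - 1 : Nat) : Int) - 1 = (m : Int) - 1 - ((k : Int) + 1) := by omega
    rw [hfst, hsnd]

-- map over range(n) of a constant is replicate
lemma answer_eq (n : Int) (q : Int) :
    (PySem.List.pyRange 0 n 1).map (fun _ => q) = List.replicate n.toNat q := by
  apply List.eq_replicate_iff.mpr
  refine ⟨by simp [PySem.List.length_pyRange_one], ?_⟩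
  intro b hb
  simp only [List.mem_map] at hb
  obtain ⟨x, _, hx⟩ := hb
  exact hx.symm
theorem solution_spec : Claim_equal_solution := by
  intro n s _ hpre
  unfold Spec_solution solution solution_alt
  obtain ⟨h1, h2⟩ := hpre
  by_cases hgt : n > s
  · simp [hgt]
  · simp only [hgt, if_false]
    set q := PySem.Int.floordiv s n with hq
    set r := PySem.Int.mod s n with hr
    by_cases hn1 : n = 1
    · -- A's special branch: q = s, r = 0
      subst hn1
      have hq1 : q = s := by
        rw [hq, PySem.Int.floordiv_eq_ediv_of_pos (by norm_num)]; simp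
      have hr1 : r = 0 := by
        rw [hr, PySem.Int.mod_eq_emod_of_pos (by norm_num)]; simp
      simp [hq1, hr1]
    · simp only [hn1, if_false]
      by_cases hneg : n < 0
      · -- n < 0: A builds [] and loops 0 times (s ≤ 0); B's replicate counts are ≤ 0
        have hs0 : s ≤ 0 := by omega
        have hb : r ≤ 0 ∧ n < r := by
          have := PySem.Int.mod_neg_bounds s hneg
          exact ⟨this.2, this.1⟩
        have e1 : PySem.List.pyRange 0 n 1 = [] :=
          PySem.List.pyRange_one_eq_nil (by omega)
        simp only [e1, List.map_nil, List.sum_nil, sub_zero]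
        have e2 : PySem.List.pyRange 0 s 1 = [] :=
          PySem.List.pyRange_one_eq_nil (by omega)
        simp only [e2, List.foldl_nil]
        have e3 : (n - r).toNat = 0 := by omega
        have e4 : r.toNat = 0 := by omega
        simp [e3, e4]
      · -- main case: 2 ≤ n ≤ s
        have hn2 : 2 ≤ n := by
          rcases lt_or_ge n 2 with h | h
          · interval_cases n <;> omega
          · exact h
        have hnpos : 0 < n := by omega
        have hrb : 0 ≤ r := PySem.Int.mod_nonneg s hnpos
        have hrlt : r < n := PySem.Int.mod_lt s hnpos
        have hans : (PySem.List.pyRange 0 n 1).map (fun _ => q) = List.replicate n.toNat q :=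
          answer_eq n q
        rw [hans]
        have hsum : (List.replicate n.toNat q).sum = n * q := by
          rw [List.sum_replicate, nsmul_eq_mul]
          have : ((n.toNat : Int)) = n := Int.toNat_of_nonneg (by omega)
          rw [this]
        rw [hsum]
        have hrem : s - n * q = r := by
          have := PySem.Int.floordiv_mul_add_mod s n
          rw [← hq, ← hr] at this
          linarith
        rw [hrem]
        have hrcast : r = ((r.toNat : Nat) : Int) := (Int.toNat_of_nonneg hrb).symm
        have hncast : ((n.toNat : Int)) = n := Int.toNat_of_nonneg (by omega)
        have hklem : r.toNat ≤ n.toNat := by omega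
        have hloop := loopA q n.toNat r.toNat hklem
        rw [hncast] at hloop
        simp only [List.length_replicate, hncast]
        rw [hrcast, hloop]
        have e5 : n.toNat - r.toNat = (n - r).toNat := by omega
        simp [e5, max_eq_left hrb]
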